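-- pv_equiv track=rewrite | github.com/cuongmv88/ProjectEuler | problem24.py | length_of_permuataion_string
-- ===== SOURCE A (Python) =====
-- import math
--
-- def sum_of_n_factorial(n):
--     result = 0
--     for i in range(1,n+1):
--         result += math.factorial(i)
--     return result
--
-- def length_of_permuataion_string(k):
--     index = 1
--     while True:
--         len = sum_of_n_factorial(index)
--         if len < k <= (len + math.factorial(index + 1)):
--             return index+1
--         index += 1
--     return 0
-- ===== SOURCE B (Python) =====
-- def length_of_permuataion_string(k):
--     # Running cumulative sum of factorials and running factorial,
--     # updated incrementally instead of recomputed from scratch.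
--     total = 1
--     fact = 1
--     m = 1
--     while total < k:
--         m += 1
--         fact *= m
--         total += fact
--     return m
-- ===== Notes on version B (the rewrite author's own statement) =====
-- stated objective: simpler
-- what changed: B replaces A's bracket test with a re-summed helper (sum_of_n_factorial recomputed from scratch every iteration) by a single running cumulative sum and running factorial, stopping at the first index whose cumulative factorial sum reaches k; Pre_ excludes k <= 1, where A loops forever while B naturally returns 1.
-- outside the precondition, e.g. on length_of_permuataion_string(1): A does not finish within the time limit, B returns 1
import Mathlib
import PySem

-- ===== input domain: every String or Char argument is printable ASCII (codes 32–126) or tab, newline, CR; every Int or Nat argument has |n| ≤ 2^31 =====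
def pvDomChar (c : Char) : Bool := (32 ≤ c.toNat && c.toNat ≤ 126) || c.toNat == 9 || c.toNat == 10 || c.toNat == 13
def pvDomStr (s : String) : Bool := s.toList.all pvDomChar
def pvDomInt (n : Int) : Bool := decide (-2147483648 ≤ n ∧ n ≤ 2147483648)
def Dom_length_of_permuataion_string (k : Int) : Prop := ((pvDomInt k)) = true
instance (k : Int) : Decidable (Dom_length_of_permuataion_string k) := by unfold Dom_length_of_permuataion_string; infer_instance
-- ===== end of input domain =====

-- B keeps a running cumulative sum and running factorial instead of recomputing
-- sum_of_n_factorial from scratch each iteration (objective: simpler).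

-- ===== PORT A =====
-- math.factorial(i) for the nonnegative arguments A uses
def pyFactorial (i : Int) : Int := (Nat.factorial i.toNat : Int)

def sum_of_n_factorial (n : Int) : Int :=
  (PySem.List.pyRange 1 (n + 1) 1).foldl (fun result i => result + pyFactorial i) 0

-- 'while True' loop of A, with a fuel guard that only makes the recursion total
-- (0 is returned only when fuel runs out, which never happens on Pre_)
def aLoop (k : Int) : Nat → Int → Int
  | 0, _ => 0
  | fuel + 1, index =>
    let len := sum_of_n_factorial index
    if len < k ∧ k ≤ len + pyFactorial (index + 1) then index + 1
    else aLoop k fuel (index + 1)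

def length_of_permuataion_string (k : Int) : Int := aLoop k k.toNat 1

-- ===== PORT B =====
-- 'while total < k' loop of B; at fuel 0 it returns m (never reached on Pre_)
def bLoop (k : Int) : Nat → Int → Int → Int → Int
  | 0, _, _, m => m
  | fuel + 1, total, fact, m =>
    if total < k then bLoop k fuel (total + fact * (m + 1)) (fact * (m + 1)) (m + 1)
    else m

def length_of_permuataion_string_alt (k : Int) : Int := bLoop k k.toNat 1 1 1

-- ===== PRECONDITION & SPEC =====
-- For k <= 1 the Python A never returns (its bracket condition 'len < k' can never
-- hold since len >= 1); Pre_ admits exactly the inputs on which A terminates.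
def Pre_length_of_permuataion_string (k : Int) : Prop := 2 ≤ k
instance (k : Int) : Decidable (Pre_length_of_permuataion_string k) := by
  unfold Pre_length_of_permuataion_string; infer_instance

def pvWitness_length_of_permuataion_string : Int := 4

def Spec_length_of_permuataion_string (k : Int) (out : Int) : Prop := out = length_of_permuataion_string_alt k
instance (k : Int) (out : Int) : Decidable (Spec_length_of_permuataion_string k out) := by unfold Spec_length_of_permuataion_string; infer_instance

-- ===== CLAIM (what is proved, stated in full; the proofs are below) =====
def Claim_equal_length_of_permuataion_string : Prop := ∀ (k : Int), Dom_length_of_permuataion_string k → Pre_length_of_permuataion_string k → Spec_length_of_permuataion_string k (length_of_permuataion_string k)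

-- ===== LEMMAS AND PROOFS =====

-- proof-side cumulative factorial sum
def S : Nat → Int
  | 0 => 0
  | m + 1 => S m + (Nat.factorial (m + 1) : Int)

lemma sum_of_n_factorial_eq (m : Nat) : sum_of_n_factorial (m : Int) = S m := by
  induction m with
  | zero =>
    simp [sum_of_n_factorial, S]
  | succ n ih =>
    have h : PySem.List.pyRange 1 ((n:Int) + 1 + 1) 1
        = PySem.List.pyRange 1 ((n:Int) + 1) 1 ++ [(n:Int) + 1] := by
      exact PySem.List.pyRange_one_succ_right (by omega)
    simp only [sum_of_n_factorial] at ih ⊢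
    push_cast
    rw [h, List.foldl_append, ih]
    simp [S, pyFactorial]

lemma S_ge (m : Nat) : (m : Int) ≤ S m := by
  induction m with
  | zero => simp [S]
  | succ n ih =>
    have h1 : (1:Int) ≤ (Nat.factorial (n+1) : Int) := by
      exact_mod_cast Nat.one_le_iff_ne_zero.mpr (Nat.factorial_ne_zero _)
    simp only [S]; push_cast; omega

-- the two loops agree whenever the answer lies within the remaining fuel
lemma loops_eq (k : Int) (fuel m : Nat) (hm : 1 ≤ m) (hlt : S m < k)
    (hle : k ≤ S (m + fuel)) :
    aLoop k fuel (m : Int) = bLoop k fuel (S m) (Nat.factorial m : Int) (m : Int) := by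
  induction fuel generalizing m with
  | zero => simp at hle; omega
  | succ f ih =>
    have hfact : pyFactorial ((m : Int) + 1) = (Nat.factorial (m + 1) : Int) := by
      simp [pyFactorial]
    have hstep : (S m) + (Nat.factorial m : Int) * ((m : Int) + 1) = S (m + 1) := by
      simp only [S]
      have : (Nat.factorial m : Int) * ((m : Int) + 1) = (Nat.factorial (m + 1) : Int) := by
        rw [Nat.factorial_succ]; push_cast; ring
      omega
    by_cases hk : k ≤ S (m + 1)
    · -- A returns m+1 here; B recurses once then stops
      have hA : aLoop k (f + 1) (m : Int) = (m : Int) + 1 := by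
        simp only [aLoop, sum_of_n_factorial_eq m, hfact]
        rw [if_pos ⟨hlt, by simpa [S] using hk⟩]
      have hB : bLoop k (f + 1) (S m) (Nat.factorial m : Int) (m : Int) = (m : Int) + 1 := by
        simp only [bLoop, if_pos hlt, hstep]
        cases f with
        | zero => simp [bLoop]
        | succ g =>
          have : ¬ S (m + 1) < k := by omega
          simp only [bLoop]
          rw [if_neg (by omega)]
      rw [hA, hB]
    · -- neither stops: both step to m+1
      push Not at hk
      have hA : aLoop k (f + 1) (m : Int) = aLoop k f ((m : Int) + 1) := by
        simp only [aLoop, sum_of_n_factorial_eq m, hfact]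
        rw [if_neg (by push Not; intro _; simpa [S] using hk)]
      have hB : bLoop k (f + 1) (S m) (Nat.factorial m : Int) (m : Int)
          = bLoop k f (S (m + 1)) (Nat.factorial (m + 1) : Int) ((m : Int) + 1) := by
        simp only [bLoop, if_pos hlt, hstep]
        congr 1
        rw [Nat.factorial_succ]; push_cast; ring
      rw [hA, hB]
      have := ih (m + 1) (by omega) hk (by
        have : m + 1 + f = m + (f + 1) := by omega
        rw [this]; exact hle)
      push_cast at this ⊢
      exact this

-- ===== VERDICT (by name: the statement is the Claim_ definition above) =====
theorem length_of_permuataion_string_spec : Claim_equal_length_of_permuataion_string := by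
  intro k _ hpre
  unfold Spec_length_of_permuataion_string
  unfold length_of_permuataion_string length_of_permuataion_string_alt
  have hk2 : (2 : Int) ≤ k := hpre
  have hS1 : S 1 = 1 := by simp [S]
  have hfuel : k ≤ S (1 + k.toNat) := by
    have h1 := S_ge (1 + k.toNat)
    have : ((1 + k.toNat : Nat) : Int) = 1 + k := by
      push_cast; omega
    omega
  have := loops_eq k k.toNat 1 (by omega) (by omega) hfuel
  simpa [hS1, Nat.factorial] using this
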